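-- pv_equiv track=rewrite | github.com/HARP-research-Inc/WordNetExplorer | tests/test_arrow_consistency.py | _categorize_word_domain
-- ===== SOURCE A (Python) =====
-- def _categorize_word_domain(word):
--     """Categorize a word into a semantic domain."""
--     domains = {
--         'animals': ['dog', 'cat', 'bird', 'mammal', 'vertebrate'],
--         'objects': ['car', 'vehicle', 'chair', 'furniture', 'table'],
--         'time': ['second', 'minute', 'hour', 'day', 'week', 'femtosecond', 'picosecond'],
--         'emotions': ['emotion', 'happiness', 'sadness', 'feeling'],
--         'actions': ['run', 'walk', 'move', 'travel'],
--         'properties': ['big', 'large', 'huge', 'small', 'tiny']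
--     }
--
--     for domain, words in domains.items():
--         if word in words:
--             return domain
--
--     return 'other'
-- ===== SOURCE B (Python) =====
-- # Inverted lookup table written directly: word -> domain, one flat dict literal.
-- _WORD_TO_DOMAIN = {
--     'dog': 'animals', 'cat': 'animals', 'bird': 'animals',
--     'mammal': 'animals', 'vertebrate': 'animals',
--     'car': 'objects', 'vehicle': 'objects', 'chair': 'objects',
--     'furniture': 'objects', 'table': 'objects',
--     'second': 'time', 'minute': 'time', 'hour': 'time', 'day': 'time',
--     'week': 'time', 'femtosecond': 'time', 'picosecond': 'time',
--     'emotion': 'emotions', 'happiness': 'emotions', 'sadness': 'emotions',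
--     'feeling': 'emotions',
--     'run': 'actions', 'walk': 'actions', 'move': 'actions', 'travel': 'actions',
--     'big': 'properties', 'large': 'properties', 'huge': 'properties',
--     'small': 'properties', 'tiny': 'properties',
-- }
--
--
-- def _categorize_word_domain(word):
--     """Categorize a word into a semantic domain."""
--     return _WORD_TO_DOMAIN.get(word, 'other')
-- ===== Notes on version B (the rewrite author's own statement) =====
-- stated objective: idiomatic
-- what changed: Replaces the per-call loop over a domain->word-list table (membership scan per list) by a flat inverted word->domain dict literal, so the body is a single dict.get with default 'other'.
import Mathlib
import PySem

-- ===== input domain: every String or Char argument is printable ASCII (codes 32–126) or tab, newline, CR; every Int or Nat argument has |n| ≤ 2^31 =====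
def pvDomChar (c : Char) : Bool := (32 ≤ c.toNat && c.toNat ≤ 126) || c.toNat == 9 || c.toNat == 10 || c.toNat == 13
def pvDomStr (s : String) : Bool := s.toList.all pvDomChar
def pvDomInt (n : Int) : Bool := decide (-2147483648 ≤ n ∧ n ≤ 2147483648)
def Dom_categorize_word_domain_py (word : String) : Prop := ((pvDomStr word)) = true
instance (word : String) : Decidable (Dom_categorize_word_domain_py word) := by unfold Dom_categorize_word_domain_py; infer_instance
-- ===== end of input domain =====

-- B replaces A's per-call loop over a domain->word-list table by a flat inverted
-- word->domain dict literal looked up once with default 'other' (idiomatic; same return value).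

-- ===== PORT A =====
def pvTableA : List (String × List String) :=
  [("animals", ["dog", "cat", "bird", "mammal", "vertebrate"]),
   ("objects", ["car", "vehicle", "chair", "furniture", "table"]),
   ("time", ["second", "minute", "hour", "day", "week", "femtosecond", "picosecond"]),
   ("emotions", ["emotion", "happiness", "sadness", "feeling"]),
   ("actions", ["run", "walk", "move", "travel"]),
   ("properties", ["big", "large", "huge", "small", "tiny"])]

-- the 'for domain, words in domains.items(): if word in words: return domain' loop
def pvLoopA (word : String) : List (String × List String) → String
  | [] => "other"
  | (d, ws) :: rest => if ws.contains word then d else pvLoopA word rest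

def categorize_word_domain_py (word : String) : String :=
  pvLoopA word pvTableA

-- ===== PORT B =====
-- the module-level flat dict literal _WORD_TO_DOMAIN
def pvWordToDomain : PySem.Dict String String :=
  PySem.Dict.ofList
    [("dog", "animals"), ("cat", "animals"), ("bird", "animals"),
     ("mammal", "animals"), ("vertebrate", "animals"),
     ("car", "objects"), ("vehicle", "objects"), ("chair", "objects"),
     ("furniture", "objects"), ("table", "objects"),
     ("second", "time"), ("minute", "time"), ("hour", "time"), ("day", "time"),
     ("week", "time"), ("femtosecond", "time"), ("picosecond", "time"),
     ("emotion", "emotions"), ("happiness", "emotions"), ("sadness", "emotions"),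
     ("feeling", "emotions"),
     ("run", "actions"), ("walk", "actions"), ("move", "actions"), ("travel", "actions"),
     ("big", "properties"), ("large", "properties"), ("huge", "properties"),
     ("small", "properties"), ("tiny", "properties")]

def categorize_word_domain_py_alt (word : String) : String :=
  pvWordToDomain.getD word "other"

-- ===== PRECONDITION & SPEC =====
def Spec_categorize_word_domain_py (word : String) (out : String) : Prop := out = categorize_word_domain_py_alt word
instance (word : String) (out : String) : Decidable (Spec_categorize_word_domain_py word out) := by unfold Spec_categorize_word_domain_py; infer_instance

-- ===== CLAIM =====
def Claim_equal_categorize_word_domain_py : Prop := ∀ (word : String), Dom_categorize_word_domain_py word → Spec_categorize_word_domain_py word (categorize_word_domain_py word)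

-- ===== LEMMAS AND PROOFS =====

-- ===== VERDICT =====
set_option maxHeartbeats 2000000 in
theorem categorize_word_domain_py_spec : Claim_equal_categorize_word_domain_py := by
  intro word _
  unfold Spec_categorize_word_domain_py categorize_word_domain_py categorize_word_domain_py_alt
  by_cases h1 : word = "dog"
  · subst h1; rfl
  by_cases h2 : word = "cat"
  · subst h2; rfl
  by_cases h3 : word = "bird"
  · subst h3; rfl
  by_cases h4 : word = "mammal"
  · subst h4; rfl
  by_cases h5 : word = "vertebrate"
  · subst h5; rfl
  by_cases h6 : word = "car"
  · subst h6; rfl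
  by_cases h7 : word = "vehicle"
  · subst h7; rfl
  by_cases h8 : word = "chair"
  · subst h8; rfl
  by_cases h9 : word = "furniture"
  · subst h9; rfl
  by_cases h10 : word = "table"
  · subst h10; rfl
  by_cases h11 : word = "second"
  · subst h11; rfl
  by_cases h12 : word = "minute"
  · subst h12; rfl
  by_cases h13 : word = "hour"
  · subst h13; rfl
  by_cases h14 : word = "day"
  · subst h14; rfl
  by_cases h15 : word = "week"
  · subst h15; rfl
  by_cases h16 : word = "femtosecond"
  · subst h16; rfl
  by_cases h17 : word = "picosecond"
  · subst h17; rfl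
  by_cases h18 : word = "emotion"
  · subst h18; rfl
  by_cases h19 : word = "happiness"
  · subst h19; rfl
  by_cases h20 : word = "sadness"
  · subst h20; rfl
  by_cases h21 : word = "feeling"
  · subst h21; rfl
  by_cases h22 : word = "run"
  · subst h22; rfl
  by_cases h23 : word = "walk"
  · subst h23; rfl
  by_cases h24 : word = "move"
  · subst h24; rfl
  by_cases h25 : word = "travel"
  · subst h25; rfl
  by_cases h26 : word = "big"
  · subst h26; rfl
  by_cases h27 : word = "large"
  · subst h27; rfl
  by_cases h28 : word = "huge"
  · subst h28; rfl
  by_cases h29 : word = "small"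
  · subst h29; rfl
  by_cases h30 : word = "tiny"
  · subst h30; rfl
  have hB : pvWordToDomain = PySem.Dict.mk
      [("dog", "animals"), ("cat", "animals"), ("bird", "animals"),
       ("mammal", "animals"), ("vertebrate", "animals"),
       ("car", "objects"), ("vehicle", "objects"), ("chair", "objects"),
       ("furniture", "objects"), ("table", "objects"),
       ("second", "time"), ("minute", "time"), ("hour", "time"), ("day", "time"),
       ("week", "time"), ("femtosecond", "time"), ("picosecond", "time"),
       ("emotion", "emotions"), ("happiness", "emotions"), ("sadness", "emotions"),
       ("feeling", "emotions"),
       ("run", "actions"), ("walk", "actions"), ("move", "actions"), ("travel", "actions"),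
       ("big", "properties"), ("large", "properties"), ("huge", "properties"),
       ("small", "properties"), ("tiny", "properties")] := by rfl
  rw [hB]
  simp [pvTableA, pvLoopA, PySem.Dict.getD, PySem.Dict.get?, beq_iff_eq, h1, h2, h3, h4, h5, h6, h7, h8, h9, h10, h11, h12, h13, h14, h15, h16, h17, h18, h19, h20, h21, h22, h23, h24, h25, h26, h27, h28, h29, h30, Ne.symm h1, Ne.symm h2, Ne.symm h3, Ne.symm h4, Ne.symm h5, Ne.symm h6, Ne.symm h7, Ne.symm h8, Ne.symm h9, Ne.symm h10, Ne.symm h11, Ne.symm h12, Ne.symm h13, Ne.symm h14, Ne.symm h15, Ne.symm h16, Ne.symm h17, Ne.symm h18, Ne.symm h19, Ne.symm h20, Ne.symm h21, Ne.symm h22, Ne.symm h23, Ne.symm h24, Ne.symm h25, Ne.symm h26, Ne.symm h27, Ne.symm h28, Ne.symm h29, Ne.symm h30]
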